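-- pv_equiv track=rewrite | github.com/AshutoshKuinkel/COSC110_PT1 | pool.py | get_cheapest_cost
-- ===== SOURCE A (Python) =====
-- def get_cheapest_cost(no_of_adults,no_of_children) -> (tuple[int, int, int, int] | None):
--   '''
--   Outputs cheapest possible transaction cost by scanning all possible combinations of billing with given adults and children arguments.
--
--   Args:
--     no_of_adults (int): Number of Adults wishing to enter facility
--     no_of_children (int): Number of Children wishing to enter facility
--
--   Returns:
--     tuple[int, int, int, int]: Captured arguments for cheapest case to output to purchase_receipt() function.
--   '''
--   # setting variables to make final calculations of cheapest cost more inuitive, focusing on core logic/problem at hand and readability rather than few short lines of code: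
--   min_cost = float('inf')
--   all_possible_nums_of_family_a_passes = no_of_adults//2 + 1 # e.g. 8 adults = 8//2 = 4 bundles possible, + 1 is to include max num...
--   all_possible_nums_of_family_b_passes = no_of_children//3 + 1 # e.g. 3 children = 3//3 = 0 + 1, 1 bundle possible
--   receipt_args_for_min_case = None
--
--   for num_of_pass_a in range(all_possible_nums_of_family_a_passes):
--     for num_of_pass_b in range(all_possible_nums_of_family_b_passes):
--
--       adults_used_for_pass_a = 2 * num_of_pass_a
--       children_used_for_pass_a = 2 * num_of_pass_a
--
--       adults_used_for_pass_b = 1 * num_of_pass_b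
--       children_used_for_pass_b = 3 * num_of_pass_b
--
--       adults_remaining = int(no_of_adults - adults_used_for_pass_a - adults_used_for_pass_b)
--       children_remaining = int(no_of_children - children_used_for_pass_a - children_used_for_pass_b)
--
--       # Skipping invalid cases where at least 1 adult dont exist and child is less than 0
--       if ( adults_remaining < 0 or children_remaining < 0):
--         continue
--
--       # total cost calulation for each case:
--       ttl_cost = 16*num_of_pass_a + 16*num_of_pass_b + 5*adults_remaining + 4*children_remaining
--
--       # only store minimum cost out of all the costs we calulated & output that to receipt:
--       if ttl_cost < min_cost :
--         min_cost = ttl_cost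
--         receipt_args_for_min_case = (num_of_pass_a,num_of_pass_b,adults_remaining,children_remaining)
--
--   return receipt_args_for_min_case
-- ===== SOURCE B (Python) =====
-- def get_cheapest_cost(no_of_adults, no_of_children):
--     '''Closed-form O(1): cost = 5A+4C-(2a+b); maximize 2a+b analytically, lex-first tie-break.'''
--     A, C = no_of_adults, no_of_children
--     if A < 0 or C < 0:
--         return None
--     a_max = min(A // 2, C // 2)
--     a0 = -((C - 3 * A) // 4)  # ceil((3A-C)/4): smallest a with A-2a <= (C-2a)//3
--     if a0 < 0:
--         a0 = 0
--     if a0 <= a_max: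
--         a, b = a0, A - 2 * a0
--     else:
--         a, b = a_max, (C - 2 * a_max) // 3
--     return (a, b, A - 2 * a - b, C - 2 * a - 3 * b)
-- ===== Notes on version B (the rewrite author's own statement) =====
-- stated objective: faster
-- what changed: B replaces A's exhaustive O(A*C) double loop over all (family-A, family-B) pass counts by a closed form: total cost equals 5A+4C-(2a+b), so B maximizes 2a+b analytically (smallest a, then smallest b, reproducing A's strict-improvement tie-break) in O(1).
import Mathlib
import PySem

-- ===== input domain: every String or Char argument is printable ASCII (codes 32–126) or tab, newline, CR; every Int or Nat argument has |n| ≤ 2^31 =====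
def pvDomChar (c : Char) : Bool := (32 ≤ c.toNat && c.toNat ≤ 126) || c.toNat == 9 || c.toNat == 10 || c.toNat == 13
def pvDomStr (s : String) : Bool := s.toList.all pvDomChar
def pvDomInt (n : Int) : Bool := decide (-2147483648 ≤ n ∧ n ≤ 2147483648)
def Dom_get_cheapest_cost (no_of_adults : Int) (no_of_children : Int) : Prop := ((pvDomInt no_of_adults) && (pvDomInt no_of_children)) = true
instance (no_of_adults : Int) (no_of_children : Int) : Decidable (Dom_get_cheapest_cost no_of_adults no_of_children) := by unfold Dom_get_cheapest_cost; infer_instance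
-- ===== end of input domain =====

-- B replaces A's O(A*C) double loop by a closed form: cost = 5A+4C-(2a+b), so B maximizes
-- 2a+b analytically and reproduces A's iteration-order tie-break (smallest a, then smallest b).

-- ===== PORT A =====
-- loop body of A's double loop (A's local variables kept as lets)
def pvBodyA (no_of_adults no_of_children : Int)
    (s : Option (Int × (Int × Int × Int × Int))) (num_of_pass_a num_of_pass_b : Int) :
    Option (Int × (Int × Int × Int × Int)) :=
  let adults_used_for_pass_a := 2 * num_of_pass_a
  let children_used_for_pass_a := 2 * num_of_pass_a
  let adults_used_for_pass_b := 1 * num_of_pass_b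
  let children_used_for_pass_b := 3 * num_of_pass_b
  let adults_remaining := no_of_adults - adults_used_for_pass_a - adults_used_for_pass_b
  let children_remaining := no_of_children - children_used_for_pass_a - children_used_for_pass_b
  if adults_remaining < 0 ∨ children_remaining < 0 then s
  else
    let ttl_cost := 16 * num_of_pass_a + 16 * num_of_pass_b + 5 * adults_remaining + 4 * children_remaining
    match s with
    | none => some (ttl_cost, (num_of_pass_a, num_of_pass_b, adults_remaining, children_remaining))
    | some (min_cost, r) =>
        if ttl_cost < min_cost then
          some (ttl_cost, (num_of_pass_a, num_of_pass_b, adults_remaining, children_remaining))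
        else some (min_cost, r)

def get_cheapest_cost (no_of_adults : Int) (no_of_children : Int) : Option (Int × Int × Int × Int) :=
  let all_possible_nums_of_family_a_passes := PySem.Int.floordiv no_of_adults 2 + 1
  let all_possible_nums_of_family_b_passes := PySem.Int.floordiv no_of_children 3 + 1
  let final := (PySem.List.pyRange 0 all_possible_nums_of_family_a_passes 1).foldl
    (fun s num_of_pass_a =>
      (PySem.List.pyRange 0 all_possible_nums_of_family_b_passes 1).foldl
        (fun s num_of_pass_b => pvBodyA no_of_adults no_of_children s num_of_pass_a num_of_pass_b) s)
    (none : Option (Int × (Int × Int × Int × Int)))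
  final.map Prod.snd

-- ===== PORT B =====
def get_cheapest_cost_alt (no_of_adults : Int) (no_of_children : Int) : Option (Int × Int × Int × Int) :=
  if no_of_adults < 0 ∨ no_of_children < 0 then none
  else
    let a_max := min (PySem.Int.floordiv no_of_adults 2) (PySem.Int.floordiv no_of_children 2)
    let a0raw := -(PySem.Int.floordiv (no_of_children - 3 * no_of_adults) 4)
    let a0 := if a0raw < 0 then 0 else a0raw
    let ab := if a0 ≤ a_max then (a0, no_of_adults - 2 * a0)
              else (a_max, PySem.Int.floordiv (no_of_children - 2 * a_max) 3)
    some (ab.1, ab.2, no_of_adults - 2 * ab.1 - ab.2, no_of_children - 2 * ab.1 - 3 * ab.2)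

-- ===== PRECONDITION & SPEC =====
def Spec_get_cheapest_cost (no_of_adults : Int) (no_of_children : Int) (out : Option (Int × Int × Int × Int)) : Prop := out = get_cheapest_cost_alt no_of_adults no_of_children
instance (no_of_adults : Int) (no_of_children : Int) (out : Option (Int × Int × Int × Int)) : Decidable (Spec_get_cheapest_cost no_of_adults no_of_children out) := by unfold Spec_get_cheapest_cost; infer_instance

-- ===== CLAIM (what is proved, stated in full; the proofs are below) =====
def Claim_equal_get_cheapest_cost : Prop := ∀ (no_of_adults : Int) (no_of_children : Int), Dom_get_cheapest_cost no_of_adults no_of_children → Spec_get_cheapest_cost no_of_adults no_of_children (get_cheapest_cost no_of_adults no_of_children)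

-- ===== LEMMAS AND PROOFS =====

-- the (a, b) that B selects, mirrored as proof-side helpers
def pvAS (A C : Int) : Int :=
  let a_max := min (PySem.Int.floordiv A 2) (PySem.Int.floordiv C 2)
  let a0raw := -(PySem.Int.floordiv (C - 3 * A) 4)
  let a0 := if a0raw < 0 then 0 else a0raw
  if a0 ≤ a_max then a0 else a_max

def pvBS (A C : Int) : Int :=
  let a_max := min (PySem.Int.floordiv A 2) (PySem.Int.floordiv C 2)
  let a0raw := -(PySem.Int.floordiv (C - 3 * A) 4)
  let a0 := if a0raw < 0 then 0 else a0raw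
  if a0 ≤ a_max then A - 2 * a0 else PySem.Int.floordiv (C - 2 * a_max) 3

lemma pv_alt_eq (A C : Int) (hA : 0 ≤ A) (hC : 0 ≤ C) :
    get_cheapest_cost_alt A C =
      some (pvAS A C, pvBS A C, A - 2 * pvAS A C - pvBS A C, C - 2 * pvAS A C - 3 * pvBS A C) := by
  unfold get_cheapest_cost_alt pvAS pvBS
  have h : ¬ (A < 0 ∨ C < 0) := by omega
  simp only [h, if_false]
  split_ifs <;> rfl

lemma pv_feas (A C : Int) (hA : 0 ≤ A) (hC : 0 ≤ C) :
    0 ≤ pvAS A C ∧ 0 ≤ pvBS A C ∧ 0 ≤ A - 2 * pvAS A C - pvBS A C ∧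
      0 ≤ C - 2 * pvAS A C - 3 * pvBS A C ∧
      pvAS A C < PySem.Int.floordiv A 2 + 1 ∧ pvBS A C < PySem.Int.floordiv C 3 + 1 := by
  unfold pvAS pvBS
  simp only [PySem.Int.floordiv_eq_ediv_of_pos (by norm_num : (0:Int) < 2),
    PySem.Int.floordiv_eq_ediv_of_pos (by norm_num : (0:Int) < 3),
    PySem.Int.floordiv_eq_ediv_of_pos (by norm_num : (0:Int) < 4)]
  split_ifs <;> omega

lemma pv_arith (A C a b : Int) (hA : 0 ≤ A) (hC : 0 ≤ C)
    (_ha : 0 ≤ a) (hb : 0 ≤ b) (h1 : 0 ≤ A - 2 * a - b) (h2 : 0 ≤ C - 2 * a - 3 * b) :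
    2 * a + b ≤ 2 * pvAS A C + pvBS A C := by
  unfold pvAS pvBS
  simp only [PySem.Int.floordiv_eq_ediv_of_pos (by norm_num : (0:Int) < 2),
    PySem.Int.floordiv_eq_ediv_of_pos (by norm_num : (0:Int) < 3),
    PySem.Int.floordiv_eq_ediv_of_pos (by norm_num : (0:Int) < 4)]
  split_ifs <;> omega

lemma pv_arith_strict (A C a b : Int) (_hA : 0 ≤ A) (_hC : 0 ≤ C)
    (ha : 0 ≤ a) (_hb : 0 ≤ b) (h1 : 0 ≤ A - 2 * a - b) (h2 : 0 ≤ C - 2 * a - 3 * b)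
    (hlt : a < pvAS A C ∨ (a = pvAS A C ∧ b < pvBS A C)) :
    2 * a + b < 2 * pvAS A C + pvBS A C := by
  unfold pvAS pvBS at *
  simp only [PySem.Int.floordiv_eq_ediv_of_pos (by norm_num : (0:Int) < 2),
    PySem.Int.floordiv_eq_ediv_of_pos (by norm_num : (0:Int) < 3),
    PySem.Int.floordiv_eq_ediv_of_pos (by norm_num : (0:Int) < 4)] at *
  split_ifs at * <;> omega

def pvInv (m : Int) (s : Option (Int × (Int × Int × Int × Int))) : Prop :=
  s = none ∨ ∃ c t, s = some (c, t) ∧ m < c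

lemma pv_body_pre (A C a b m : Int) (s : Option (Int × (Int × Int × Int × Int)))
    (h : 0 ≤ A - 2 * a - b → 0 ≤ C - 2 * a - 3 * b →
      m < 16 * a + 16 * b + 5 * (A - 2 * a - b) + 4 * (C - 2 * a - 3 * b))
    (hs : pvInv m s) : pvInv m (pvBodyA A C s a b) := by
  simp only [pvBodyA]
  split_ifs with hfeas
  · exact hs
  · have hm := h (by omega) (by omega)
    rcases hs with rfl | ⟨c, t, rfl, hc⟩
    · exact Or.inr ⟨_, _, rfl, by omega⟩
    · show pvInv m (if _ < c then _ else _)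
      split_ifs with hlt
      · exact Or.inr ⟨_, _, rfl, by omega⟩
      · exact Or.inr ⟨_, _, rfl, hc⟩

lemma pv_body_post (A C a b m : Int) (t : Int × Int × Int × Int)
    (h : 0 ≤ A - 2 * a - b → 0 ≤ C - 2 * a - 3 * b →
      m ≤ 16 * a + 16 * b + 5 * (A - 2 * a - b) + 4 * (C - 2 * a - 3 * b)) :
    pvBodyA A C (some (m, t)) a b = some (m, t) := by
  simp only [pvBodyA]
  split_ifs with hfeas hlt
  · rfl
  · exact absurd hlt (by have := h (by omega) (by omega); omega)
  · rfl

lemma pv_inner_pre (A C a m : Int) (l : List Int) (s : Option (Int × (Int × Int × Int × Int)))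
    (h : ∀ b ∈ l, 0 ≤ A - 2 * a - b → 0 ≤ C - 2 * a - 3 * b →
      m < 16 * a + 16 * b + 5 * (A - 2 * a - b) + 4 * (C - 2 * a - 3 * b))
    (hs : pvInv m s) : pvInv m (l.foldl (fun s b => pvBodyA A C s a b) s) := by
  induction l generalizing s with
  | nil => exact hs
  | cons b l ih =>
    exact ih _ (fun b' hb' => h b' (List.mem_cons_of_mem _ hb'))
      (pv_body_pre A C a b m s (h b (List.mem_cons_self)) hs)

lemma pv_inner_post (A C a m : Int) (t : Int × Int × Int × Int) (l : List Int)
    (h : ∀ b ∈ l, 0 ≤ A - 2 * a - b → 0 ≤ C - 2 * a - 3 * b →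
      m ≤ 16 * a + 16 * b + 5 * (A - 2 * a - b) + 4 * (C - 2 * a - 3 * b)) :
    l.foldl (fun s b => pvBodyA A C s a b) (some (m, t)) = some (m, t) := by
  induction l with
  | nil => rfl
  | cons b l ih =>
    rw [List.foldl_cons, pv_body_post A C a b m t (h b (List.mem_cons_self))]
    exact ih (fun b' hb' => h b' (List.mem_cons_of_mem _ hb'))

lemma pv_outer_pre (A C m : Int) (bl : List Int) (l : List Int)
    (s : Option (Int × (Int × Int × Int × Int)))
    (h : ∀ a ∈ l, ∀ b ∈ bl, 0 ≤ A - 2 * a - b → 0 ≤ C - 2 * a - 3 * b →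
      m < 16 * a + 16 * b + 5 * (A - 2 * a - b) + 4 * (C - 2 * a - 3 * b))
    (hs : pvInv m s) :
    pvInv m (l.foldl (fun s a => bl.foldl (fun s b => pvBodyA A C s a b) s) s) := by
  induction l generalizing s with
  | nil => exact hs
  | cons a l ih =>
    exact ih _ (fun a' ha' => h a' (List.mem_cons_of_mem _ ha'))
      (pv_inner_pre A C a m _ s (h a (List.mem_cons_self)) hs)

lemma pv_outer_post (A C m : Int) (t : Int × Int × Int × Int) (bl : List Int) (l : List Int)
    (h : ∀ a ∈ l, ∀ b ∈ bl, 0 ≤ A - 2 * a - b → 0 ≤ C - 2 * a - 3 * b →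
      m ≤ 16 * a + 16 * b + 5 * (A - 2 * a - b) + 4 * (C - 2 * a - 3 * b)) :
    l.foldl (fun s a => bl.foldl (fun s b => pvBodyA A C s a b) s) (some (m, t)) = some (m, t) := by
  induction l with
  | nil => rfl
  | cons a l ih =>
    rw [List.foldl_cons, pv_inner_post A C a m t _ (h a (List.mem_cons_self))]
    exact ih (fun a' ha' => h a' (List.mem_cons_of_mem _ ha'))

lemma pv_foldl_id {α β : Type} (l : List α) (s : β) : l.foldl (fun s _ => s) s = s := by
  induction l with
  | nil => rfl
  | cons a l ih => exact ih

lemma pv_range_empty (n : Int) (h : n ≤ 0) : PySem.List.pyRange 0 n 1 = [] := by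
  rw [PySem.List.pyRange_one]
  have : (n - 0).toNat = 0 := by omega
  rw [this]
  rfl

-- ===== VERDICT (by name: the statement is the Claim_ definition above) =====
theorem get_cheapest_cost_spec : Claim_equal_get_cheapest_cost := by
  intro A C _
  unfold Spec_get_cheapest_cost
  by_cases hA : A < 0
  · have hna : PySem.Int.floordiv A 2 + 1 ≤ 0 := by
      rw [PySem.Int.floordiv_eq_ediv_of_pos (by norm_num : (0:Int) < 2)]; omega
    simp only [get_cheapest_cost, get_cheapest_cost_alt, pv_range_empty _ hna]
    rw [if_pos (Or.inl hA)]
    rfl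
  · by_cases hC : C < 0
    · have hnb : PySem.Int.floordiv C 3 + 1 ≤ 0 := by
        rw [PySem.Int.floordiv_eq_ediv_of_pos (by norm_num : (0:Int) < 3)]; omega
      rw [get_cheapest_cost, get_cheapest_cost_alt]
      simp only [pv_range_empty _ hnb, List.foldl_nil, pv_foldl_id, Option.map_none, hC, or_true,
        if_true]
    · have hA' : 0 ≤ A := by omega
      have hC' : 0 ≤ C := by omega
      obtain ⟨hf1, hf2, hf3, hf4, hf5, hf6⟩ := pv_feas A C hA' hC'
      set na := PySem.Int.floordiv A 2 + 1 with hna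
      set nb := PySem.Int.floordiv C 3 + 1 with hnb
      set aS := pvAS A C with haS
      set bS := pvBS A C with hbS
      set cM := 16 * aS + 16 * bS + 5 * (A - 2 * aS - bS) + 4 * (C - 2 * aS - 3 * bS) with hcM
      -- split the ranges at the selected (aS, bS)
      have hsplitA : PySem.List.pyRange 0 na 1 =
          PySem.List.pyRange 0 aS 1 ++ aS :: PySem.List.pyRange (aS + 1) na 1 := by
        rw [← PySem.List.pyRange_one_cons (by omega : aS < na),
          PySem.List.pyRange_one_append 0 aS na hf1 (by omega)]
      have hsplitB : PySem.List.pyRange 0 nb 1 =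
          PySem.List.pyRange 0 bS 1 ++ bS :: PySem.List.pyRange (bS + 1) nb 1 := by
        rw [← PySem.List.pyRange_one_cons (by omega : bS < nb),
          PySem.List.pyRange_one_append 0 bS nb hf2 (by omega)]
      set BL := PySem.List.pyRange 0 bS 1 ++ bS :: PySem.List.pyRange (bS + 1) nb 1 with hBL
      have hmemBL : ∀ b : Int, b ∈ BL → 0 ≤ b ∧ b < nb := by
        intro b hb
        rw [← hsplitB, PySem.List.mem_pyRange_one] at hb
        exact hb
      rw [get_cheapest_cost]
      simp only [← hna, ← hnb]
      rw [hsplitB, hsplitA, List.foldl_append, List.foldl_cons]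
      -- state after the prefix a < aS
      have hs1 : pvInv cM ((PySem.List.pyRange 0 aS 1).foldl (fun s a =>
          BL.foldl (fun s b => pvBodyA A C s a b) s) none) := by
        apply pv_outer_pre
        · intro a ha b hb hr1 hr2
          rw [PySem.List.mem_pyRange_one] at ha
          have hb' := hmemBL b hb
          have := pv_arith_strict A C a b hA' hC' ha.1 hb'.1 hr1 hr2 (Or.inl ha.2)
          omega
        · exact Or.inl rfl
      -- the aS iteration: split its inner loop at bS
      have hmid : BL.foldl (fun s b => pvBodyA A C s aS b)
          ((PySem.List.pyRange 0 aS 1).foldl (fun s a =>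
            BL.foldl (fun s b => pvBodyA A C s a b) s) none) =
          some (cM, (aS, bS, A - 2 * aS - bS, C - 2 * aS - 3 * bS)) := by
        rw [hBL, List.foldl_append, List.foldl_cons]
        have hs2 : pvInv cM ((PySem.List.pyRange 0 bS 1).foldl (fun s b => pvBodyA A C s aS b)
            ((PySem.List.pyRange 0 aS 1).foldl (fun s a =>
              BL.foldl (fun s b => pvBodyA A C s a b) s) none)) := by
          apply pv_inner_pre
          · intro b hb hr1 hr2
            rw [PySem.List.mem_pyRange_one] at hb
            have := pv_arith_strict A C aS b hA' hC' hf1 hb.1 hr1 hr2 (Or.inr ⟨rfl, hb.2⟩)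
            omega
          · exact hs1
        have hstep : pvBodyA A C ((PySem.List.pyRange 0 bS 1).foldl (fun s b => pvBodyA A C s aS b)
            ((PySem.List.pyRange 0 aS 1).foldl (fun s a =>
              BL.foldl (fun s b => pvBodyA A C s a b) s) none)) aS bS =
            some (cM, (aS, bS, A - 2 * aS - bS, C - 2 * aS - 3 * bS)) := by
          rcases hs2 with heq | ⟨c, t, heq, hc⟩ <;> rw [heq] <;> simp only [pvBodyA]
          · rw [if_neg (by omega)]
            simp only [one_mul]
            rfl
          · rw [if_neg (by omega), if_pos (by omega)]
            simp only [one_mul]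
            rfl
        rw [hstep]
        apply pv_inner_post
        intro b hb hr1 hr2
        rw [PySem.List.mem_pyRange_one] at hb
        have := pv_arith A C aS b hA' hC' hf1 (by omega) hr1 hr2
        omega
      rw [hmid]
      have hrest : (PySem.List.pyRange (aS + 1) na 1).foldl (fun s a =>
          BL.foldl (fun s b => pvBodyA A C s a b) s)
          (some (cM, (aS, bS, A - 2 * aS - bS, C - 2 * aS - 3 * bS))) =
          some (cM, (aS, bS, A - 2 * aS - bS, C - 2 * aS - 3 * bS)) := by
        apply pv_outer_post
        intro a ha b hb hr1 hr2
        rw [PySem.List.mem_pyRange_one] at ha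
        have hb' := hmemBL b hb
        have := pv_arith A C a b hA' hC' (by omega) hb'.1 hr1 hr2
        omega
      rw [hrest, pv_alt_eq A C hA' hC']
      rfl
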